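-- pv_equiv track=rewrite | github.com/jjuraska/slug2slug | e2e_nlg/stylistic_selection.py | find_subordinate_clause_wh
-- ===== SOURCE A (Python) =====
-- def find_subordinate_clause_wh(ptree):
--     subord_clause_tag = '(SBAR'
--     wh_phrase_tag = '(WH'
--     expect_wh_phrase = False
--
--     for line in ptree:
--         line_content = line.strip()
--         if line_content == subord_clause_tag:
--             expect_wh_phrase = True
--         elif expect_wh_phrase and line_content.startswith(wh_phrase_tag):
--             return True
--         else:
--             expect_wh_phrase = False
--
--     return False
-- ===== SOURCE B (Python) =====
-- def find_subordinate_clause_wh(ptree):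
--     stripped = [line.strip() for line in ptree]
--     sbar_positions = [i for i, s in enumerate(stripped) if s == '(SBAR']
--     return any(i + 1 < len(stripped) and stripped[i + 1].startswith('(WH')
--                for i in sbar_positions)
-- ===== Notes on version B (the rewrite author's own statement) =====
-- stated objective: alternative
-- what changed: Replaces A's one-pass boolean state machine with three staged declarative passes: strip all lines, collect the indices of '(SBAR' lines, then test whether any collected index has a successor line starting with '(WH'.
import Mathlib
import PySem

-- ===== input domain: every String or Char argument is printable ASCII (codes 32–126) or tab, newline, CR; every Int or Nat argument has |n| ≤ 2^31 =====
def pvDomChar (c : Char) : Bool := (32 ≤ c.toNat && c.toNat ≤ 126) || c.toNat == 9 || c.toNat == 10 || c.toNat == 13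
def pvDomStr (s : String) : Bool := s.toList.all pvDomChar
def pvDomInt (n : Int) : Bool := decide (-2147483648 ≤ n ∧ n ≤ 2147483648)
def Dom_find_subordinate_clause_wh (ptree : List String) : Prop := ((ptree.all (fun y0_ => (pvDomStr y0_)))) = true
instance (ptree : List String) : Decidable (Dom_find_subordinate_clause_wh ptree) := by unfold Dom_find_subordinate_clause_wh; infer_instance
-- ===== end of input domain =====

-- B replaces A's one-pass boolean state machine with three staged declarative passes
-- (strip all, collect '(SBAR' indices, test successors); alternative decomposition, same cost.


-- ===== PORT A =====
-- loop over lines carrying the boolean flag expect_wh_phrase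
def findSubA (lines : List String) (expect_wh_phrase : Bool) : Bool :=
  match lines with
  | [] => false
  | line :: rest =>
    let line_content := PySem.Str.strip line
    if line_content = "(SBAR" then findSubA rest true
    else if expect_wh_phrase && PySem.Str.startswith line_content "(WH" then true
    else findSubA rest false

def find_subordinate_clause_wh (ptree : List String) : Bool :=
  findSubA ptree false

-- ===== PORT B =====
-- staged passes: strip all lines; collect indices of '(SBAR' lines; any successor starts with '(WH'
def find_subordinate_clause_wh_alt (ptree : List String) : Bool :=
  let stripped := ptree.map PySem.Str.strip
  let sbar_positions := (PySem.List.enumerate stripped 0).filterMap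
    (fun p => if p.2 = "(SBAR" then some p.1 else none)
  sbar_positions.any (fun i =>
    decide (i + 1 < (stripped.length : Int)) &&
    PySem.Str.startswith (PySem.List.pyGetD stripped (i + 1) "") "(WH")

-- ===== PRECONDITION & SPEC =====
def Spec_find_subordinate_clause_wh (ptree : List String) (out : Bool) : Prop := out = find_subordinate_clause_wh_alt ptree
instance (ptree : List String) (out : Bool) : Decidable (Spec_find_subordinate_clause_wh ptree out) := by unfold Spec_find_subordinate_clause_wh; infer_instance

-- ===== CLAIM (what is proved, stated in full; the proofs are below) =====
def Claim_equal_find_subordinate_clause_wh : Prop := ∀ (ptree : List String), Dom_find_subordinate_clause_wh ptree → Spec_find_subordinate_clause_wh ptree (find_subordinate_clause_wh ptree)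

-- ===== LEMMAS AND PROOFS =====

-- adjacent-pair characterisation over the list of stripped lines
def pairsS : List String → Bool
  | a :: b :: r => (a = "(SBAR" && PySem.Str.startswith b "(WH") || pairsS (b :: r)
  | _ => false

theorem findSubA_step (x : String) (xs : List String) (b : Bool) :
    findSubA (x :: xs) b =
      ((b && PySem.Str.startswith (PySem.Str.strip x) "(WH") ||
        findSubA xs (PySem.Str.strip x = "(SBAR")) := by
  simp only [findSubA]
  by_cases hc : PySem.Str.strip x = "(SBAR"
  · have hsw : PySem.Chars.startswith ['(', 'S', 'B', 'A', 'R'] ['(', 'W', 'H'] = false := by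
      decide
    simp [hc, PySem.Str.startswith, hsw]
  · by_cases hb : b = true <;>
      cases hs : PySem.Str.startswith (PySem.Str.strip x) "(WH" <;>
        simp [hc, hb]

theorem findSubA_eq_pairsS (l : List String) (b : Bool) :
    findSubA l b =
      ((b && (match l with
              | [] => false
              | x :: _ => PySem.Str.startswith (PySem.Str.strip x) "(WH")) ||
        pairsS (l.map PySem.Str.strip)) := by
  induction l generalizing b with
  | nil => simp [findSubA, pairsS]
  | cons x xs ih =>
    rw [findSubA_step, ih]
    cases xs with
    | nil => simp [pairsS]
    | cons y ys =>
      simp only [List.map_cons, pairsS]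

theorem pairsS_iff (l : List String) :
    pairsS l = true ↔
      ∃ k, k + 1 < l.length ∧ l.getD k "" = "(SBAR" ∧
        PySem.Str.startswith (l.getD (k + 1) "") "(WH" = true := by
  match l with
  | [] => simp [pairsS]
  | [a] =>
    constructor
    · intro h; simp [pairsS] at h
    · rintro ⟨k, hk, -, -⟩
      simp only [List.length_singleton] at hk
      omega
  | a :: b :: r =>
    rw [show pairsS (a :: b :: r) =
        ((a = "(SBAR" && PySem.Str.startswith b "(WH") || pairsS (b :: r)) from rfl]
    rw [Bool.or_eq_true, Bool.and_eq_true, pairsS_iff (b :: r)]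
    constructor
    · rintro (⟨h1, h2⟩ | ⟨k, hk, h3, h4⟩)
      · exact ⟨0, by simp, by simpa using h1, by simpa using h2⟩
      · exact ⟨k + 1, by simpa using hk, by simpa using h3, by simpa using h4⟩
    · rintro ⟨k, hk, h3, h4⟩
      cases k with
      | zero => exact Or.inl ⟨by simpa using h3, by simpa using h4⟩
      | succ j =>
        exact Or.inr ⟨j, by simpa using hk, by simpa using h3, by simpa using h4⟩

theorem alt_iff (ptree : List String) :
    find_subordinate_clause_wh_alt ptree = true ↔
      ∃ k, k + 1 < (ptree.map PySem.Str.strip).length ∧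
        (ptree.map PySem.Str.strip).getD k "" = "(SBAR" ∧
        PySem.Str.startswith ((ptree.map PySem.Str.strip).getD (k + 1) "") "(WH" = true := by
  unfold find_subordinate_clause_wh_alt
  set stripped := ptree.map PySem.Str.strip with hst
  simp only [List.any_eq_true, List.mem_filterMap, PySem.List.mem_enumerate_iff,
    Bool.and_eq_true, decide_eq_true_eq]
  constructor
  · rintro ⟨i, ⟨⟨i', s⟩, ⟨k, hklen, hpair⟩, hif⟩, hlt, hsw⟩
    obtain ⟨hi', hs⟩ := Prod.mk.injEq .. ▸ hpair
    split at hif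
    · rename_i hsbar
      have hii : i' = i := Option.some.inj hif
      have hik : i = (k : Int) := by rw [← hii, hi']; ring
      refine ⟨k, ?_, ?_, ?_⟩
      · rw [hik] at hlt; exact_mod_cast hlt
      · rw [List.getD_eq_getElem?_getD, List.getElem?_eq_getElem hklen]
        simp only [Option.getD_some]
        rw [← hs]; exact hsbar
      · rw [hik, show ((k : Int) + 1) = ((k + 1 : Nat) : Int) from by push_cast; ring,
          PySem.List.pyGetD_natCast] at hsw
        exact hsw
    · exact absurd hif (by simp)
  · rintro ⟨k, hk, hsbar, hsw⟩
    have hklt : k < stripped.length := by omega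
    have hget : stripped[k]'hklt = "(SBAR" := by
      rwa [List.getD_eq_getElem?_getD, List.getElem?_eq_getElem hklt, Option.getD_some] at hsbar
    refine ⟨(k : Int), ⟨((k : Int), stripped[k]'hklt), ⟨k, hklt, by simp⟩, by simp [hget]⟩, ?_, ?_⟩
    · omega
    · rw [show ((k : Int) + 1) = ((k + 1 : Nat) : Int) from by push_cast; ring,
        PySem.List.pyGetD_natCast]
      exact hsw

-- ===== VERDICT (by name: the statement is the Claim_ definition above) =====
theorem find_subordinate_clause_wh_spec : Claim_equal_find_subordinate_clause_wh := by
  intro ptree _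
  unfold Spec_find_subordinate_clause_wh find_subordinate_clause_wh
  rw [findSubA_eq_pairsS, Bool.false_and, Bool.false_or]
  rw [Bool.eq_iff_iff, pairsS_iff, alt_iff]
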